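-- pv_equiv track=rewrite | github.com/thaReal/MasterChef | codeforces/round_663/fixyou.py | solve
-- ===== SOURCE A (Python) =====
-- def solve(n, m, grid):
-- 	# First find C
-- 	for i in range(n):
-- 		for j in range(m):
-- 			if grid[i][j] == 'C':
-- 				cn = i
-- 				cm = j
-- 				break
--
-- 	# DEBUG
-- 	#print ("Cn: {}, Cm: {}".format(cn, cm))
--
-- 	cntr = 0
-- 	for i in range(n):
-- 		for j in range(m):
-- 			if (i, j) == (cn, cm):
-- 				continue
--
-- 			if i >= cn and grid[i][j] == 'D':
-- 				cntr += 1
-- 				continue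
--
-- 			if j >= cm and grid[i][j] == 'R':
-- 				cntr += 1
-- 				continue
--
-- 	return cntr
-- ===== SOURCE B (Python) =====
-- def solve(n, m, grid):
--     region = ["".join(grid[i][j] for j in range(m)) for i in range(n)]
--     hit = next(((i, row) for i, row in enumerate(region) if 'C' in row), None)
--     if hit is None:
--         return 0
--     cn, crow = hit
--     cm = crow.find('C')
--     below = sum(row.count('D') for row in region[cn:])
--     cols = list(zip(*region))
--     right = sum(col.count('R') for col in cols[cm:])
--     return below + right
-- ===== Notes on version B (the rewrite author's own statement) =====
-- stated objective: alternative
-- what changed: B materializes the scanned n-by-m window once as a list of row strings, finds the FIRST 'C'-bearing row with next(enumerate(...)), and counts D over the row suffix region[cn:] and R over the column suffix cols[cm:] of the zip(*region) transpose, instead of A's two nested per-cell index loops with a break-search and a three-branch test per cell; …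
-- outside the precondition, e.g. on solve(2, 2, ['CD', 'CD']): A returns 1, B returns 2
import Mathlib
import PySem

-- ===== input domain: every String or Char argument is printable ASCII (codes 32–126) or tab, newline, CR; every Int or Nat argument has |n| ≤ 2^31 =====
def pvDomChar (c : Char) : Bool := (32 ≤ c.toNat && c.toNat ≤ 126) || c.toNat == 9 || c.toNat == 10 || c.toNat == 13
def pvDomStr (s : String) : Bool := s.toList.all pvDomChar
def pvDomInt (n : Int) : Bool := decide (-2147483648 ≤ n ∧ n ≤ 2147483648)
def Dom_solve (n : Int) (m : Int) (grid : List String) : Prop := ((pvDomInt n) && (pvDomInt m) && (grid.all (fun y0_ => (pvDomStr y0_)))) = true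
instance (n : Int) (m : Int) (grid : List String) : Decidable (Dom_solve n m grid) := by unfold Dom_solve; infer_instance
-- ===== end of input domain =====

-- B replaces A's per-cell nested loops (break-search for 'C', then a three-branch test at
-- every cell) by: materialize the scanned n-by-m window once, take the FIRST 'C'-bearing
-- row, count 'D' over the row suffix and 'R' over the column suffix of the zip(*region)
-- transpose. Objective: alternative (same asymptotic cost, different traversal and layout).

-- ===== PORT A =====
/-- `grid[i][j]` as an option (`none` = IndexError, excluded by `Pre_solve`). -/
def pvCellA (grid : List String) (i j : Int) : Option Char :=
  match PySem.List.pyGet? grid i with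
  | some s => PySem.Str.pyGet? s j
  | none => none

/-- A's inner search loop over row `i`: the first `'C'` sets `(cn, cm)`, then `break`
(the `Bool` flag). -/
def pvFindRowA (grid : List String) (m : Int) (i : Int) (st : Option (Int × Int)) :
    Option (Int × Int) :=
  ((PySem.List.pyRange 0 m 1).foldl
    (fun (s : Option (Int × Int) × Bool) j =>
      if s.2 then s
      else if pvCellA grid i j = some 'C' then (some (i, j), true)
      else s)
    (st, false)).1

def solve (n : Int) (m : Int) (grid : List String) : Int :=
  let st := (PySem.List.pyRange 0 n 1).foldl (fun st i => pvFindRowA grid m i st) none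
  match st with
  | none => 0  -- Python: NameError (`cn`/`cm` never bound); excluded by `Pre_solve`
  | some (cn, cm) =>
    (PySem.List.pyRange 0 n 1).foldl (fun cntr i =>
      (PySem.List.pyRange 0 m 1).foldl (fun cntr j =>
        if (i, j) = (cn, cm) then cntr
        else if cn ≤ i ∧ pvCellA grid i j = some 'D' then cntr + 1
        else if cm ≤ j ∧ pvCellA grid i j = some 'R' then cntr + 1
        else cntr) cntr) 0

-- ===== PORT B =====
/-- Fuel-driven step of `zip(*rows)`: stop when any row is exhausted. The fuel is the
length of the first row, which bounds the number of produced columns. -/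
def pyZipStarGo : Nat → List (List Char) → List (List Char)
  | 0, _ => []
  | f + 1, rows =>
    if rows.any List.isEmpty then []
    else (rows.map (fun r => r.headD ' ')) :: pyZipStarGo f (rows.map List.tail)

/-- Python `list(zip(*rows))`: truncating transpose (exact, incl. `zip()` of no rows). -/
def pyZipStar (rows : List (List Char)) : List (List Char) :=
  match rows with
  | [] => []
  | r :: rs => pyZipStarGo r.length (r :: rs)

/-- `grid[i][j]` as B's region comprehension reads it (defaults are unreachable under
`Pre_solve`, where every scanned index is in range). -/
def pvCellB (grid : List String) (i j : Int) : Char :=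
  PySem.List.pyGetD (PySem.List.pyGetD grid i "").toList j ' '

def solve_alt (n : Int) (m : Int) (grid : List String) : Int :=
  let region := (PySem.List.pyRange 0 n 1).map
    (fun i => String.ofList ((PySem.List.pyRange 0 m 1).map (fun j => pvCellB grid i j)))
  match (PySem.List.enumerate region).find? (fun p => PySem.Str.isIn "C" p.2) with
  | none => 0
  | some (cn, crow) =>
    let cm := PySem.Str.find crow "C"
    let below := (PySem.List.slice region (some cn) none).foldl
      (fun acc row => acc + (PySem.Str.count row "D" : Int)) 0
    let cols := pyZipStar (region.map String.toList)
    let right := (PySem.List.slice cols (some cm) none).foldl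
      (fun acc col => acc + ((col.count 'R' : Nat) : Int)) 0
    below + right

-- ===== PRECONDITION & SPEC =====
-- Pre_solve: either the scan region is empty (n ≤ 0 or m ≤ 0: both programs visit no cell
-- and return 0), or exactly the shape on which A returns normally (n ≤ len(grid), every
-- scanned row at least m characters — else IndexError; a 'C'-bearing row — else NameError)
-- with exactly ONE 'C'-bearing scanned row: with several, A's break-only-inner search
-- accidentally lands on the LAST such row, a first-vs-last corner no one would specify
-- (B naturally takes the first).
def Pre_solve (n : Int) (m : Int) (grid : List String) : Prop :=
  n ≤ 0 ∨ m ≤ 0 ∨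
  (n ≤ (grid.length : Int) ∧
   (∀ s ∈ grid.take n.toNat, m ≤ (s.toList.length : Int)) ∧
   (grid.take n.toNat).countP (fun s => decide ('C' ∈ s.toList.take m.toNat)) = 1)
instance (n : Int) (m : Int) (grid : List String) : Decidable (Pre_solve n m grid) := by
  unfold Pre_solve; infer_instance

def pvWitness_solve : Int × Int × List String := (2, 2, ["RD", "CD"])

def Spec_solve (n : Int) (m : Int) (grid : List String) (out : Int) : Prop := out = solve_alt n m grid
instance (n : Int) (m : Int) (grid : List String) (out : Int) : Decidable (Spec_solve n m grid out) := by unfold Spec_solve; infer_instance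

-- ===== CLAIM (what is proved, stated in full; the proofs are below) =====
def Claim_equal_solve : Prop := ∀ (n : Int) (m : Int) (grid : List String), Dom_solve n m grid → Pre_solve n m grid → Spec_solve n m grid (solve n m grid)
-- ===== LEMMAS AND PROOFS =====

theorem pv_break_fix (grid : List String) (i : Int) (l : List Int) (x : Option (Int × Int)) :
    l.foldl (fun (s : Option (Int × Int) × Bool) j =>
      if s.2 then s
      else if pvCellA grid i j = some 'C' then (some (i, j), true)
      else s) (x, true) = (x, true) := by
  induction l with
  | nil => rfl
  | cons a t ih => simpa using ih

theorem pv_find_row_aux (grid : List String) (i : Int) (l : List Int) :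
    ∀ st : Option (Int × Int),
    (l.foldl (fun (s : Option (Int × Int) × Bool) j =>
      if s.2 then s
      else if pvCellA grid i j = some 'C' then (some (i, j), true)
      else s) (st, false)).1 =
    match l.find? (fun j => decide (pvCellA grid i j = some 'C')) with
    | some j => some (i, j)
    | none => st := by
  induction l with
  | nil => intro st; rfl
  | cons a t ih =>
    intro st
    by_cases h : pvCellA grid i a = some 'C'
    · simp [h, pv_break_fix]
    · simp only [List.foldl_cons, List.find?_cons, h, decide_false, if_false,
        Bool.false_eq_true]
      simpa using ih st

theorem pv_find?_min {p : Int → Bool} : ∀ {l : List Int}, l.Pairwise (· < ·) →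
    ∀ {j : Int}, l.find? p = some j → ∀ k ∈ l, k < j → p k = false := by
  intro l hl
  induction l with
  | nil => intro j h; simp at h
  | cons a t ih =>
    intro j hj k hk hkj
    rw [List.pairwise_cons] at hl
    rw [List.find?_cons] at hj
    by_cases ha : p a
    · simp [ha] at hj
      rcases List.mem_cons.1 hk with rfl | hk'
      · omega
      · exact absurd (hl.1 _ hk') (by omega)
    · simp [ha] at hj
      rcases List.mem_cons.1 hk with rfl | hk'
      · simpa using ha
      · exact ih hl.2 hj k hk' hkj

theorem pv_foldl_last (p : Int → Bool) (g : Int → Option (Int × Int)) :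
    ∀ (l : List Int) (st : Option (Int × Int)),
    l.foldl (fun st i => if p i then g i else st) st =
    match (l.filter p).getLast? with
    | some i => g i
    | none => st := by
  intro l
  induction l with
  | nil => intro st; rfl
  | cons a t ih =>
    intro st
    rw [List.foldl_cons, ih, List.filter_cons]
    by_cases hp : p a
    · simp only [hp, if_true]
      rw [List.getLast?_cons]
      cases h : (t.filter p).getLast? with
      | none => simp
      | some b => simp
    · simp [hp]

def pvRowT (grid : List String) (m : Int) (i : Int) : List Char :=
  (PySem.List.pyGetD grid i "").toList.take m.toNat

theorem pv_cell (grid : List String) (m : Int) {i j : Int} (hi0 : 0 ≤ i)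
    (hi1 : i < (grid.length : Int))
    (hj0 : 0 ≤ j) (hj1 : j < m) :
    pvCellA grid i j = (pvRowT grid m i)[j.toNat]? := by
  have hiN : i.toNat < grid.length := by omega
  have h1 : PySem.List.pyGet? grid i = some (PySem.List.pyGetD grid i "") := by
    rw [PySem.List.pyGet?_eq_some_getElem grid hi0 hi1, PySem.List.pyGetD_eq_getElem grid "" hi0 hi1]
  unfold pvCellA
  rw [h1]
  show PySem.Str.pyGet? (PySem.List.pyGetD grid i "") j = (pvRowT grid m i)[j.toNat]?
  have h2 : PySem.Str.pyGet? (PySem.List.pyGetD grid i "") j =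
      (PySem.List.pyGetD grid i "").toList[j.toNat]? := by
    rw [PySem.Str.pyGet?_eq, PySem.Chars.pyGet?_eq_listPyGet?,
      PySem.List.pyGet?_of_nonneg _ hj0]
  rw [h2, pvRowT, List.getElem?_take]
  have : j.toNat < m.toNat := by omega
  simp [this]

theorem pv_row_find? (grid : List String) (m : Int) {i : Int} (hi0 : 0 ≤ i)
    (hi1 : i < (grid.length : Int)) :
    (PySem.List.pyRange 0 m 1).find? (fun j => decide (pvCellA grid i j = some 'C')) =
    if 'C' ∈ pvRowT grid m i then some (PySem.Chars.find (pvRowT grid m i) ['C']) else none := by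
  by_cases hC : 'C' ∈ pvRowT grid m i
  · simp only [hC, if_true]
    set f := PySem.Chars.find (pvRowT grid m i) ['C'] with hf
    have hinf : ['C'] <:+: pvRowT grid m i := (List.singleton_infix_iff _ _).2 hC
    have hf0 : 0 ≤ f := (PySem.Chars.find_nonneg_iff _ _).2 hinf
    obtain ⟨hpre, hmin⟩ := PySem.Chars.find_spec hf0
    have hget : (pvRowT grid m i)[f.toNat]? = some 'C' := by
      rw [← List.head?_drop]
      rcases hpre with ⟨t, ht⟩
      rw [← ht]; rfl
    obtain ⟨hlt, hgetE⟩ := List.getElem?_eq_some_iff.1 hget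
    have hlen : (pvRowT grid m i).length ≤ m.toNat := by
      simp [pvRowT, List.length_take]
    have hfm : f < m := by omega
    have hpf : (fun j => decide (pvCellA grid i j = some 'C')) f = true := by
      simp only [decide_eq_true_eq]
      rw [pv_cell grid m hi0 hi1 hf0 hfm]; exact hget
    have hmemf : f ∈ PySem.List.pyRange 0 m 1 := PySem.List.mem_pyRange_one.2 ⟨hf0, hfm⟩
    have hsome : ((PySem.List.pyRange 0 m 1).find?
        (fun j => decide (pvCellA grid i j = some 'C'))).isSome := by
      rw [List.find?_isSome]; exact ⟨f, hmemf, hpf⟩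
    obtain ⟨j0, hj0⟩ := Option.isSome_iff_exists.1 hsome
    have hj0mem := List.mem_of_find?_eq_some hj0
    have hj0r := PySem.List.mem_pyRange_one.1 hj0mem
    have hj0p : pvCellA grid i j0 = some 'C' := by
      have := List.find?_some hj0; simpa using this
    have hj0get : (pvRowT grid m i)[j0.toNat]? = some 'C' := by
      rw [← pv_cell grid m hi0 hi1 hj0r.1 hj0r.2]; exact hj0p
    have hj0f : j0 = f := by
      rcases lt_trichotomy j0 f with hlt' | heq | hgt
      · exfalso
        refine hmin j0.toNat (by omega) ?_
        obtain ⟨t, ht⟩ := List.head?_eq_some_iff.1 (by rw [List.head?_drop]; exact hj0get)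
        exact ⟨t, by rw [ht]; rfl⟩
      · exact heq
      · exfalso
        have h2 := pv_find?_min (PySem.List.pairwise_lt_pyRange_one 0 m) hj0 f hmemf hgt
        simp only [decide_eq_true_eq] at hpf
        simp only [decide_eq_false_iff_not] at h2
        exact h2 hpf
    rw [hj0, hj0f]
  · rw [if_neg hC, List.find?_eq_none]
    intro j hj
    rw [PySem.List.mem_pyRange_one] at hj
    simp only [decide_eq_true_eq]
    rw [pv_cell grid m hi0 hi1 hj.1 hj.2]
    intro hsome
    exact hC (List.mem_of_getElem? hsome)

theorem pv_count_go_single (c : Char) :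
    ∀ (l : List Char) (fuel acc : Nat), l.length ≤ fuel →
    PySem.Chars.count.go [c] fuel l acc = acc + l.count c := by
  intro l
  induction l with
  | nil =>
    intro fuel acc _
    cases fuel <;> simp [PySem.Chars.count.go]
  | cons h t ih =>
    intro fuel acc hf
    cases fuel with
    | zero => simp at hf
    | succ f =>
      by_cases hc : c = h
      · subst hc
        rw [show PySem.Chars.count.go [c] (f+1) (c :: t) acc
            = PySem.Chars.count.go [c] f (List.drop 1 (c :: t)) (acc + 1) from by
          rw [PySem.Chars.count.go]
          simp]
        simp only [List.drop_one, List.tail_cons]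
        rw [ih f (acc+1) (by simpa using hf)]
        simp
        omega
      · rw [show PySem.Chars.count.go [c] (f+1) (h :: t) acc
            = PySem.Chars.count.go [c] f t acc from by
          rw [PySem.Chars.count.go]
          simp [List.isPrefixOf, hc]]
        rw [ih f acc (by simpa using hf)]
        simp [Ne.symm hc]

theorem pv_count_single (c : Char) (s : List Char) :
    PySem.Chars.count s [c] = s.count c := by
  rw [PySem.Chars.count, pv_count_go_single c s s.length 0 le_rfl]
  simp

theorem pv_sum_ite (c : Char) (l : List Char) :
    (l.map (fun ch => if ch = c then (1 : Int) else 0)).sum = (l.count c : Int) := by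
  induction l with
  | nil => simp
  | cons a t ih =>
    by_cases h : a = c
    · subst h; simp [ih]; omega
    · simp [h, ih]

theorem pv_sum_count (grid : List String) (m : Int) {i : Int} (hi0 : 0 ≤ i)
    (hi1 : i < (grid.length : Int))
    (hm : m ≤ ((PySem.List.pyGetD grid i "").toList.length : Int))
    {a : Int} (ha0 : 0 ≤ a) (c : Char) :
    ((PySem.List.pyRange a m 1).map
      (fun j => if pvCellA grid i j = some c then (1 : Int) else 0)).sum
      = (((pvRowT grid m i).drop a.toNat).count c : Int) := by
  set xs := pvRowT grid m i with hxs
  have hlen : xs.length = m.toNat := by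
    rw [hxs, pvRowT, List.length_take]; omega
  have hm' : (xs.length : Int) = m ∨ m ≤ 0 := by omega
  rcases hm' with hm' | hm'
  · have step1 : ∀ j ∈ PySem.List.pyRange a m 1,
        (if pvCellA grid i j = some c then (1 : Int) else 0)
        = ((fun ch => if ch = c then (1 : Int) else 0) ∘
            (fun j => PySem.List.pyGetD xs j '?')) j := by
      intro j hj
      rw [PySem.List.mem_pyRange_one] at hj
      have hj0 : 0 ≤ j := le_trans ha0 hj.1
      have hjlt : j.toNat < xs.length := by omega
      simp only [Function.comp_apply]
      rw [pv_cell grid m hi0 hi1 hj0 hj.2, ← hxs, List.getElem?_eq_getElem hjlt,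
        PySem.List.pyGetD_eq_getElem xs '?' hj0 (by omega)]
      simp
    rw [List.map_congr_left step1, ← List.map_map,
      show PySem.List.pyRange a m 1 = PySem.List.pyRange a (xs.length : Int) 1 from by rw [hm'],
      PySem.List.map_pyGetD_pyRange' xs '?' ha0, pv_sum_ite]
  · have h1 : PySem.List.pyRange a m 1 = [] := PySem.List.pyRange_one_eq_nil (by omega)
    have h2 : xs = [] := by
      have : xs.length = 0 := by omega
      exact List.eq_nil_of_length_eq_zero this
    simp [h1, h2]

theorem pv_map_rows {β : Type} (grid : List String) (n : Int) (hn : n ≤ (grid.length : Int))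
    {a : Int} (ha0 : 0 ≤ a) (f : String → β) :
    (PySem.List.pyRange a n 1).map (fun i => f (PySem.List.pyGetD grid i ""))
      = ((grid.take n.toNat).drop a.toNat).map f := by
  set xs := grid.take n.toNat with hxs
  have hlen : xs.length = n.toNat := by rw [hxs, List.length_take]; omega
  have hn' : (xs.length : Int) = n ∨ n ≤ 0 := by omega
  rcases hn' with hn' | hn'
  · have step : ∀ i ∈ PySem.List.pyRange a n 1,
        f (PySem.List.pyGetD grid i "")
        = ((fun s => f s) ∘ (fun i => PySem.List.pyGetD xs i "")) i := by
      intro i hi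
      rw [PySem.List.mem_pyRange_one] at hi
      have hi0 : 0 ≤ i := le_trans ha0 hi.1
      have hiN : i.toNat < xs.length := by omega
      simp only [Function.comp_apply]
      congr 1
      rw [PySem.List.pyGetD_eq_getElem grid "" hi0 (by omega),
        PySem.List.pyGetD_eq_getElem xs "" hi0 (by omega)]
      simp only [hxs, List.getElem_take]
    rw [List.map_congr_left step, ← List.map_map,
      show PySem.List.pyRange a n 1 = PySem.List.pyRange a (xs.length : Int) 1 from by rw [hn'],
      PySem.List.map_pyGetD_pyRange' xs "" ha0]
  · have h1 : PySem.List.pyRange a n 1 = [] := PySem.List.pyRange_one_eq_nil (by omega)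
    have h2 : xs = [] := by
      have : xs.length = 0 := by omega
      exact List.eq_nil_of_length_eq_zero this
    simp [h1, h2]

theorem pv_find_C (grid : List String) (m : Int) {i : Int}
    (hC : 'C' ∈ pvRowT grid m i) :
    0 ≤ PySem.Chars.find (pvRowT grid m i) ['C'] ∧
    PySem.Chars.find (pvRowT grid m i) ['C'] < m ∧
    (pvRowT grid m i)[(PySem.Chars.find (pvRowT grid m i) ['C']).toNat]? = some 'C' := by
  set f := PySem.Chars.find (pvRowT grid m i) ['C'] with hf
  have hinf : ['C'] <:+: pvRowT grid m i := (List.singleton_infix_iff _ _).2 hC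
  have hf0 : 0 ≤ f := (PySem.Chars.find_nonneg_iff _ _).2 hinf
  obtain ⟨hpre, hmin⟩ := PySem.Chars.find_spec hf0
  have hget : (pvRowT grid m i)[f.toNat]? = some 'C' := by
    rw [← List.head?_drop]
    rcases hpre with ⟨t, ht⟩
    rw [← ht]; rfl
  obtain ⟨hlt, _⟩ := List.getElem?_eq_some_iff.1 hget
  have hlen : (pvRowT grid m i).length ≤ m.toNat := by
    rw [pvRowT, List.length_take]; omega
  exact ⟨hf0, by omega, hget⟩

theorem pv_inner_step (grid : List String) {cn cm : Int}
    (hcell : pvCellA grid cn cm = some 'C') (i : Int) (c : Int) (j : Int) :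
    (if (i, j) = (cn, cm) then c
     else if cn ≤ i ∧ pvCellA grid i j = some 'D' then c + 1
     else if cm ≤ j ∧ pvCellA grid i j = some 'R' then c + 1
     else c)
    = c + ((if cn ≤ i ∧ pvCellA grid i j = some 'D' then (1 : Int) else 0)
         + (if cm ≤ j ∧ pvCellA grid i j = some 'R' then (1 : Int) else 0)) := by
  by_cases hij : (i, j) = (cn, cm)
  · obtain ⟨rfl, rfl⟩ := Prod.mk.injEq .. ▸ Prod.ext_iff.1 hij
    rw [if_pos rfl]
    simp [hcell]
  · rw [if_neg hij]
    by_cases hd : cn ≤ i ∧ pvCellA grid i j = some 'D'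
    · have hr : ¬(cm ≤ j ∧ pvCellA grid i j = some 'R') := by
        rintro ⟨_, hr⟩; rw [hd.2] at hr; simp at hr
      rw [if_pos hd, if_pos hd, if_neg hr]; ring
    · rw [if_neg hd, if_neg hd]
      by_cases hr : cm ≤ j ∧ pvCellA grid i j = some 'R'
      · rw [if_pos hr, if_pos hr]; ring
      · rw [if_neg hr, if_neg hr]; ring

/-- A's second nested loop, with a valid `'C'` cell `(cn, cm)`, equals the two canonical
region sums (D over the row suffix, R over the per-row column suffix). -/
theorem pv_countA (n m : Int) (grid : List String) (cn cm : Int)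
    (hn : n ≤ (grid.length : Int))
    (hrows : ∀ s ∈ grid.take n.toNat, m ≤ (s.toList.length : Int))
    (hcn0 : 0 ≤ cn) (hcn1 : cn < n) (hcm0 : 0 ≤ cm) (hcm1 : cm < m)
    (hcell : pvCellA grid cn cm = some 'C') :
    (PySem.List.pyRange 0 n 1).foldl (fun cntr i =>
      (PySem.List.pyRange 0 m 1).foldl (fun cntr j =>
        if (i, j) = (cn, cm) then cntr
        else if cn ≤ i ∧ pvCellA grid i j = some 'D' then cntr + 1
        else if cm ≤ j ∧ pvCellA grid i j = some 'R' then cntr + 1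
        else cntr) cntr) 0
    = (((grid.take n.toNat).drop cn.toNat).map
        (fun s => (((s.toList.take m.toNat).count 'D' : Nat) : Int))).sum
      + ((grid.take n.toNat).map
        (fun s => ((((s.toList.take m.toNat).drop cm.toNat).count 'R' : Nat) : Int))).sum := by
  have hn0 : 0 ≤ n := by omega
  have hm0 : 0 ≤ m := by omega
  have hrowlen : ∀ i : Int, 0 ≤ i → i < n →
      m ≤ ((PySem.List.pyGetD grid i "").toList.length : Int) := by
    intro i hi0 hin
    rw [PySem.List.pyGetD_eq_getElem grid "" hi0 (by omega)]
    apply hrows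
    have hiN : i.toNat < (grid.take n.toNat).length := by rw [List.length_take]; omega
    have := List.getElem_mem hiN
    rwa [List.getElem_take] at this
  have hinner : ∀ i ∈ PySem.List.pyRange 0 n 1, ∀ c : Int,
      (PySem.List.pyRange 0 m 1).foldl (fun cntr j =>
        if (i, j) = (cn, cm) then cntr
        else if cn ≤ i ∧ pvCellA grid i j = some 'D' then cntr + 1
        else if cm ≤ j ∧ pvCellA grid i j = some 'R' then cntr + 1
        else cntr) c
      = c + ((if cn ≤ i then (((pvRowT grid m i).count 'D' : Nat) : Int) else 0)
           + ((((pvRowT grid m i).drop cm.toNat).count 'R' : Nat) : Int)) := by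
    intro i hi c
    rw [PySem.List.mem_pyRange_one] at hi
    rw [PySem.List.foldl_congr_mem _ _
        (fun c j => c + ((if cn ≤ i ∧ pvCellA grid i j = some 'D' then (1 : Int) else 0)
          + (if cm ≤ j ∧ pvCellA grid i j = some 'R' then (1 : Int) else 0))) c
        (fun c j _ => pv_inner_step grid hcell i c j)]
    rw [PySem.List.foldl_add (PySem.List.pyRange 0 m 1)
      (fun j => (if cn ≤ i ∧ pvCellA grid i j = some 'D' then (1 : Int) else 0)
          + (if cm ≤ j ∧ pvCellA grid i j = some 'R' then (1 : Int) else 0)) c]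
    rw [PySem.List.sum_map_add_int]
    congr 1
    congr 1
    · by_cases hcni : cn ≤ i
      · rw [if_pos hcni]
        rw [List.map_congr_left (g := fun j =>
            if pvCellA grid i j = some 'D' then (1 : Int) else 0)
          (fun j _ => by simp [hcni])]
        have := pv_sum_count grid m hi.1 (by omega) (hrowlen i hi.1 hi.2) le_rfl 'D'
        simpa using this
      · rw [if_neg hcni]
        apply List.sum_eq_zero
        intro x hx
        obtain ⟨j, _, rfl⟩ := List.mem_map.1 hx
        simp [hcni]
    · rw [PySem.List.pyRange_one_append 0 cm m hcm0 (le_of_lt hcm1),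
        List.map_append, List.sum_append]
      have hleft : ((PySem.List.pyRange 0 cm 1).map
          (fun j => if cm ≤ j ∧ pvCellA grid i j = some 'R' then (1 : Int) else 0)).sum
          = 0 := by
        apply List.sum_eq_zero
        intro x hx
        obtain ⟨j, hj, rfl⟩ := List.mem_map.1 hx
        rw [PySem.List.mem_pyRange_one] at hj
        have hno : ¬(cm ≤ j ∧ pvCellA grid i j = some 'R') := by
          rintro ⟨h1, _⟩; omega
        simp [hno]
      rw [hleft, zero_add]
      rw [List.map_congr_left (g := fun j =>
          if pvCellA grid i j = some 'R' then (1 : Int) else 0)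
        (fun j hj => by
          rw [PySem.List.mem_pyRange_one] at hj
          simp [hj.1])]
      exact pv_sum_count grid m hi.1 (by omega) (hrowlen i hi.1 hi.2) hcm0 'R'
  rw [PySem.List.foldl_congr_mem _ _
      (fun c i => c + ((if cn ≤ i then (((pvRowT grid m i).count 'D' : Nat) : Int) else 0)
           + ((((pvRowT grid m i).drop cm.toNat).count 'R' : Nat) : Int))) 0
      (fun c i hi => hinner i hi c)]
  rw [PySem.List.foldl_add (PySem.List.pyRange 0 n 1)
    (fun i => (if cn ≤ i then (((pvRowT grid m i).count 'D' : Nat) : Int) else 0)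
           + ((((pvRowT grid m i).drop cm.toNat).count 'R' : Nat) : Int)) 0,
    PySem.List.sum_map_add_int, zero_add]
  congr 1
  · rw [PySem.List.pyRange_one_append 0 cn n hcn0 (le_of_lt hcn1),
      List.map_append, List.sum_append]
    have hleft : ((PySem.List.pyRange 0 cn 1).map
        (fun i => if cn ≤ i then (((pvRowT grid m i).count 'D' : Nat) : Int) else 0)).sum
        = 0 := by
      apply List.sum_eq_zero
      intro x hx
      obtain ⟨i, hi, rfl⟩ := List.mem_map.1 hx
      rw [PySem.List.mem_pyRange_one] at hi
      rw [if_neg (by omega)]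
    rw [hleft, zero_add]
    rw [List.map_congr_left (g := fun i =>
        (fun s => (((s.toList.take m.toNat).count 'D' : Nat) : Int))
          (PySem.List.pyGetD grid i ""))
      (fun i hi => by
        rw [PySem.List.mem_pyRange_one] at hi
        rw [if_pos hi.1]; rfl)]
    exact congrArg List.sum (pv_map_rows grid n hn hcn0
      (fun s => (((s.toList.take m.toNat).count 'D' : Nat) : Int)))
  · rw [List.map_congr_left
      (f := fun i => (((pvRowT grid m i).drop cm.toNat).count 'R' : Int))
      (g := fun i =>
        (fun s => ((((s.toList.take m.toNat).drop cm.toNat).count 'R' : Nat) : Int))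
          (PySem.List.pyGetD grid i ""))
      (fun i _ => rfl)]
    have := pv_map_rows grid n hn (le_refl (0:Int))
      (fun s => ((((s.toList.take m.toNat).drop cm.toNat).count 'R' : Nat) : Int))
    rw [this, show ((0 : Int).toNat) = 0 from rfl, List.drop_zero]

theorem pv_foldl_id (l : List Int) (st : Option (Int × Int)) :
    l.foldl (fun st (_ : Int) => st) st = st := by
  induction l <;> simp_all

theorem pv_solve_trivial (n m : Int) (grid : List String) (h : n ≤ 0 ∨ m ≤ 0) :
    solve n m grid = 0 := by
  rcases h with h | h
  · simp only [solve, PySem.List.pyRange_one_eq_nil h, List.foldl_nil]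
  · have hrow : ∀ (st : Option (Int × Int)) (i : Int), pvFindRowA grid m i st = st := by
      intro st i
      rw [pvFindRowA, PySem.List.pyRange_one_eq_nil h, List.foldl_nil]
    simp only [solve]
    rw [PySem.List.foldl_congr_mem _ _ (fun st (_ : Int) => st) none
      (fun st i _ => hrow st i), pv_foldl_id]

-- ===== B-side lemmas =====

theorem pv_zip_cons (L : List (List Char)) (hne : L ≠ []) (h : ∀ r ∈ L, r ≠ []) :
    pyZipStar L = (L.map (fun r => r.headD ' ')) :: pyZipStar (L.map List.tail) := by
  match L, hne with
  | r :: rs, _ =>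
    have hr : r ≠ [] := h r List.mem_cons_self
    obtain ⟨a, r', rfl⟩ : ∃ a r', r = a :: r' := by
      cases r with
      | nil => exact absurd rfl hr
      | cons a r' => exact ⟨a, r', rfl⟩
    have hany : ((a :: r') :: rs).any List.isEmpty = false := by
      rw [List.any_eq_false]
      intro x hx
      have := h x hx
      simpa [List.isEmpty_iff] using this
    show pyZipStarGo (r'.length + 1) ((a :: r') :: rs) = _
    rw [pyZipStarGo, if_neg (by simp [hany])]
    rfl

theorem pv_zip_drop : ∀ (k M : Nat) (L : List (List Char)),
    (∀ r ∈ L, r.length = M) → k ≤ M →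
    (pyZipStar L).drop k = pyZipStar (L.map (List.drop k)) := by
  intro k
  induction k with
  | zero =>
    intro M L _ _
    rw [List.drop_zero, List.map_congr_left (fun x _ => List.drop_zero), List.map_id']
  | succ k ih =>
    intro M L hlen hk
    obtain ⟨M', rfl⟩ : ∃ M', M = M' + 1 := by
      cases M with
      | zero => omega
      | succ M' => exact ⟨M', rfl⟩
    cases L with
    | nil => rfl
    | cons r rs =>
      have hne : ∀ x ∈ r :: rs, x ≠ [] := by
        intro x hx hnil
        have := hlen x hx
        rw [hnil] at this
        simp at this
      rw [pv_zip_cons (r :: rs) (by simp) hne, List.drop_succ_cons,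
        ih M' ((r :: rs).map List.tail)
          (by
            intro t ht
            obtain ⟨x, hx, rfl⟩ := List.mem_map.1 ht
            have := hlen x hx
            rw [List.length_tail, this]
            omega) (by omega),
        List.map_map]
      congr 1
      apply List.map_congr_left
      intro x _
      show (x.tail).drop k = x.drop (k + 1)
      rw [← List.drop_one, List.drop_drop]
      congr 1
      omega

theorem pv_zip_sum (c : Char) : ∀ (M : Nat) (L : List (List Char)),
    (∀ r ∈ L, r.length = M) →
    ((pyZipStar L).map (fun col => ((col.count c : Nat) : Int))).sum
      = (L.map (fun r => ((r.count c : Nat) : Int))).sum := by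
  intro M
  induction M with
  | zero =>
    intro L hlen
    have hz : pyZipStar L = [] := by
      cases L with
      | nil => rfl
      | cons r rs =>
        have : r.length = 0 := hlen r List.mem_cons_self
        have hr : r = [] := List.eq_nil_of_length_eq_zero this
        show pyZipStarGo r.length (r :: rs) = []
        rw [this]
        rfl
    rw [hz]
    show (0 : Int) = _
    symm
    apply List.sum_eq_zero
    intro x hx
    obtain ⟨r, hr, rfl⟩ := List.mem_map.1 hx
    have : r = [] := List.eq_nil_of_length_eq_zero (hlen r hr)
    simp [this]
  | succ M' ih =>
    intro L hlen
    cases L with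
    | nil => rfl
    | cons r rs =>
      have hne : ∀ x ∈ r :: rs, x ≠ [] := by
        intro x hx hnil
        have := hlen x hx
        rw [hnil] at this
        simp at this
      rw [pv_zip_cons (r :: rs) (by simp) hne, List.map_cons, List.sum_cons,
        ih ((r :: rs).map List.tail)
          (by
            intro t ht
            obtain ⟨x, hx, rfl⟩ := List.mem_map.1 ht
            have := hlen x hx
            rw [List.length_tail, this]
            omega)]
      have hhead : ((((r :: rs).map (fun x => x.headD ' ')).count c : Nat) : Int)
          = ((r :: rs).map (fun x => if x.headD ' ' = c then (1 : Int) else 0)).sum := by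
        rw [← pv_sum_ite c ((r :: rs).map (fun x => x.headD ' ')), List.map_map]
        rfl
      rw [hhead, List.map_map, ← PySem.List.sum_map_add_int]
      apply congrArg List.sum
      apply List.map_congr_left
      intro x hx
      obtain ⟨a, x', rfl⟩ : ∃ a x', x = a :: x' := by
        cases x with
        | nil => exact absurd rfl (hne _ hx)
        | cons a x' => exact ⟨a, x', rfl⟩
      simp only [Function.comp_apply, List.headD_cons, List.tail_cons, List.count_cons]
      by_cases hac : a = c
      · simp [hac]
        omega
      · simp [hac]

theorem pv_range_filter (Qb : String → Bool) : ∀ (T : List String),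
    ((List.range T.length).filter (fun k => Qb (T.getD k ""))).length = T.countP Qb := by
  intro T
  induction T with
  | nil => simp
  | cons a t ih =>
    rw [List.length_cons, List.range_succ_eq_map, List.filter_cons, List.countP_cons]
    have hmap : ((List.range t.length).map Nat.succ).filter
        (fun k => Qb ((a :: t).getD k ""))
        = ((List.range t.length).filter (fun k => Qb (t.getD k ""))).map Nat.succ := by
      rw [List.filter_map]
      rfl
    by_cases hq : Qb a
    · simp only [List.getD_cons_zero, hq, if_true, List.length_cons, hmap,
        List.length_map, ih]
    · simp only [List.getD_cons_zero, hq, Bool.false_eq_true, if_false, hmap,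
        List.length_map, ih]
      omega

theorem pv_cm_eq (row : List Char) :
    PySem.Str.find (String.ofList row) "C" = PySem.Chars.find row ['C'] := by
  rw [PySem.Str.find_eq]
  simp only [String.toList_ofList]
  rfl

/-- The inner comprehension `''.join(grid[i][j] for j in range(m))` reads the first
`m` characters of a row of length ≥ m. -/
theorem pv_rowB (xs : List Char) (m : Int) (hm : m ≤ (xs.length : Int)) :
    (PySem.List.pyRange 0 m 1).map (fun j => PySem.List.pyGetD xs j ' ')
      = xs.take m.toNat := by
  by_cases hm0 : m ≤ 0
  · rw [PySem.List.pyRange_one_eq_nil (by omega), show m.toNat = 0 from by omega,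
      List.take_zero, List.map_nil]
  · set ys := xs.take m.toNat with hys
    have hlen : ys.length = m.toNat := by rw [hys, List.length_take]; omega
    have hlen' : (ys.length : Int) = m := by omega
    have step : ∀ j ∈ PySem.List.pyRange 0 m 1,
        PySem.List.pyGetD xs j ' ' = PySem.List.pyGetD ys j ' ' := by
      intro j hj
      rw [PySem.List.mem_pyRange_one] at hj
      rw [PySem.List.pyGetD_eq_getElem xs ' ' hj.1 (by omega),
        PySem.List.pyGetD_eq_getElem ys ' ' hj.1 (by omega)]
      simp [hys, List.getElem_take]
    rw [List.map_congr_left step,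
      show PySem.List.pyRange 0 m 1 = PySem.List.pyRange 0 (ys.length : Int) 1 from by
        rw [hlen'],
      PySem.List.map_pyGetD_pyRange_zero' ys ' ']

theorem pv_main (n m : Int) (grid : List String)
    (hnpos : 0 < n) (hmpos : 0 < m) (hn : n ≤ (grid.length : Int))
    (hrows : ∀ s ∈ grid.take n.toNat, m ≤ (s.toList.length : Int))
    (hcount : (grid.take n.toNat).countP
      (fun s => decide ('C' ∈ s.toList.take m.toNat)) = 1) :
    solve n m grid = solve_alt n m grid := by
  have hn0 : 0 ≤ n := le_of_lt hnpos
  have hm0 : 0 ≤ m := le_of_lt hmpos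
  set T := grid.take n.toNat with hT
  have hTlen : T.length = n.toNat := by rw [hT, List.length_take]; omega
  set Qb : String → Bool := fun s => decide ('C' ∈ s.toList.take m.toNat) with hQb
  -- the unique 'C'-bearing row index u
  have hKlen : ((List.range T.length).filter (fun k => Qb (T.getD k ""))).length = 1 := by
    rw [pv_range_filter Qb T]
    exact hcount
  obtain ⟨u, hK⟩ := List.length_eq_one_iff.1 hKlen
  have huMem : u ∈ (List.range T.length).filter (fun k => Qb (T.getD k "")) := by
    rw [hK]; exact List.mem_cons_self
  rw [List.mem_filter, List.mem_range] at huMem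
  obtain ⟨huLt, huQ⟩ := huMem
  have huN : u < n.toNat := by omega
  have hTget : T.getD u "" = PySem.List.pyGetD grid (u : Int) "" := by
    rw [List.getD_eq_getElem T "" huLt,
      PySem.List.pyGetD_eq_getElem grid "" (by positivity) (by omega)]
    simp [hT, List.getElem_take]
  have hrowT : ∀ k : Nat, k < n.toNat →
      pvRowT grid m (k : Int) = (T.getD k "").toList.take m.toNat := by
    intro k hk
    rw [pvRowT, List.getD_eq_getElem T "" (by omega),
      PySem.List.pyGetD_eq_getElem grid "" (by positivity) (by omega)]
    simp [hT, List.getElem_take]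
  have hCu : 'C' ∈ pvRowT grid m (u : Int) := by
    rw [hrowT u huN]
    exact of_decide_eq_true huQ
  -- the Int-filter over the range is the singleton [u]
  have hLint : (PySem.List.pyRange 0 n 1).filter
      (fun i => decide ('C' ∈ pvRowT grid m i)) = [(u : Int)] := by
    rw [PySem.List.pyRange_one 0 n,
      show (n - 0).toNat = T.length from by rw [hTlen]; omega, List.filter_map]
    have hcongr : (List.range T.length).filter
        ((fun i => decide ('C' ∈ pvRowT grid m i)) ∘ (fun k : Nat => 0 + (k : Int)))
        = (List.range T.length).filter (fun k => Qb (T.getD k "")) := by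
      apply List.filter_congr
      intro k hk
      rw [List.mem_range] at hk
      simp only [Function.comp_apply, zero_add]
      rw [hrowT k (by omega)]
    rw [hcongr, hK]
    simp
  -- A's search result
  have hA1 : (PySem.List.pyRange 0 n 1).foldl (fun st i => pvFindRowA grid m i st)
        (none : Option (Int × Int))
      = some ((u : Int), PySem.Chars.find (pvRowT grid m (u : Int)) ['C']) := by
    rw [PySem.List.foldl_congr_mem _ _
      (fun st i => if decide ('C' ∈ pvRowT grid m i)
        then some (i, PySem.Chars.find (pvRowT grid m i) ['C']) else st) none ?_]
    · rw [pv_foldl_last _ _ _ none, hLint]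
      rfl
    · intro st i hi
      rw [PySem.List.mem_pyRange_one] at hi
      show pvFindRowA grid m i st = _
      rw [pvFindRowA, pv_find_row_aux grid i _ st,
        pv_row_find? grid m hi.1 (by omega)]
      by_cases hC : 'C' ∈ pvRowT grid m i
      · simp [hC]
      · simp [hC]
  obtain ⟨hcm0, hcm1, hcmget⟩ := pv_find_C grid m hCu
  set cm := PySem.Chars.find (pvRowT grid m (u : Int)) ['C'] with hcmdef
  have hcell : pvCellA grid (u : Int) cm = some 'C' := by
    rw [pv_cell grid m (by positivity) (by omega) hcm0 hcm1]
    exact hcmget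
  -- B's region
  have hrowlen : ∀ i : Int, 0 ≤ i → i < n →
      m ≤ ((PySem.List.pyGetD grid i "").toList.length : Int) := by
    intro i hi0 hin
    rw [PySem.List.pyGetD_eq_getElem grid "" hi0 (by omega)]
    apply hrows
    have hiN : i.toNat < (grid.take n.toNat).length := by rw [List.length_take]; omega
    have := List.getElem_mem hiN
    rwa [List.getElem_take] at this
  have hrowsEq : (PySem.List.pyRange 0 n 1).map
      (fun i => String.ofList ((PySem.List.pyRange 0 m 1).map (fun j => pvCellB grid i j)))
      = T.map (fun s => String.ofList (s.toList.take m.toNat)) := by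
    have step : ∀ i ∈ PySem.List.pyRange 0 n 1,
        String.ofList ((PySem.List.pyRange 0 m 1).map (fun j => pvCellB grid i j))
          = (fun s => String.ofList (s.toList.take m.toNat))
              (PySem.List.pyGetD grid i "") := by
      intro i hi
      rw [PySem.List.mem_pyRange_one] at hi
      show String.ofList ((PySem.List.pyRange 0 m 1).map
        (fun j => PySem.List.pyGetD (PySem.List.pyGetD grid i "").toList j ' ')) = _
      rw [pv_rowB _ m (hrowlen i hi.1 hi.2)]
    rw [List.map_congr_left step]
    have := pv_map_rows grid n hn (le_refl (0 : Int))
      (fun s => String.ofList (s.toList.take m.toNat))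
    rw [this, show ((0 : Int).toNat) = 0 from rfl, List.drop_zero, hT]
  set rows := T.map (fun s => String.ofList (s.toList.take m.toNat)) with hrowsDef
  have hrowsLen : rows.length = n.toNat := by
    rw [hrowsDef, List.length_map, hTlen]
  -- B's search result
  have hgetRows : ∀ k : Nat, k < n.toNat →
      PySem.List.pyGetD rows (k : Int) ""
        = String.ofList ((T.getD k "").toList.take m.toNat) := by
    intro k hk
    rw [PySem.List.pyGetD_eq_getElem rows "" (by positivity) (by omega)]
    simp only [Int.toNat_natCast, hrowsDef, List.getElem_map]
    rw [List.getD_eq_getElem T "" (by omega)]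
  have hB1 : (PySem.List.enumerate rows).find? (fun p => PySem.Str.isIn "C" p.2)
      = some ((u : Int), String.ofList ((T.getD u "").toList.take m.toNat)) := by
    rw [PySem.List.enumerate_eq_map_pyRange rows "", List.find?_map]
    have hlen' : PySem.List.len rows = n := by
      rw [PySem.List.len_eq, hrowsLen]; omega
    rw [hlen']
    have hfind : (PySem.List.pyRange 0 n 1).find?
        ((fun p => PySem.Str.isIn "C" p.2) ∘ (fun j => (j, PySem.List.pyGetD rows j "")))
        = some (u : Int) := by
      rw [← List.head?_filter]
      have hcongr : (PySem.List.pyRange 0 n 1).filter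
          ((fun p => PySem.Str.isIn "C" p.2) ∘ (fun j => (j, PySem.List.pyGetD rows j "")))
          = (PySem.List.pyRange 0 n 1).filter (fun i => decide ('C' ∈ pvRowT grid m i)) := by
        apply List.filter_congr
        intro j hj
        rw [PySem.List.mem_pyRange_one] at hj
        obtain ⟨k, rfl⟩ : ∃ k : Nat, j = (k : Int) := ⟨j.toNat, by omega⟩
        have hkN : k < n.toNat := by omega
        simp only [Function.comp_apply]
        rw [hgetRows k hkN, Bool.eq_iff_iff, PySem.Str.isIn_iff_infix,
          decide_eq_true_eq, hrowT k hkN]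
        simp only [String.toList_ofList]
        exact List.singleton_infix_iff 'C' _
      rw [hcongr, hLint]
      rfl
    rw [hfind]
    simp only [Option.map_some]
    rw [hgetRows u huN]
  -- lengths of the truncated char rows
  have hLc : rows.map String.toList
      = T.map (fun s => s.toList.take m.toNat) := by
    rw [hrowsDef, List.map_map]
    apply List.map_congr_left
    intro s _
    exact String.toList_ofList
  have hLcLen : ∀ r ∈ T.map (fun s => s.toList.take m.toNat), r.length = m.toNat := by
    intro r hr
    obtain ⟨s, hs, rfl⟩ := List.mem_map.1 hr
    rw [List.length_take]
    have := hrows s (hT ▸ hs)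
    omega
  -- assemble
  show solve n m grid = solve_alt n m grid
  rw [solve, solve_alt]
  simp only [hrowsEq, hA1, hB1]
  rw [pv_countA n m grid (u : Int) cm hn hrows (by positivity) (by omega) hcm0 hcm1 hcell]
  -- B's cm
  have hcmB : PySem.Str.find (String.ofList ((T.getD u "").toList.take m.toNat)) "C"
      = cm := by
    rw [pv_cm_eq, hcmdef, hrowT u huN]
  rw [hcmB]
  congr 1
  · -- A's D sum = B's `below`
    rw [PySem.List.slice_from rows (by positivity),
      show ((u : Int)).toNat = u from Int.toNat_natCast u,
      PySem.List.foldl_add (rows.drop u) (fun row => (PySem.Str.count row "D" : Int)) 0,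
      zero_add, hrowsDef, ← List.map_drop, List.map_map]
    apply congrArg List.sum
    apply List.map_congr_left
    intro s _
    simp only [Function.comp_apply]
    rw [PySem.Str.count_eq, String.toList_ofList,
      show ("D".toList) = ['D'] from rfl, pv_count_single]
  · -- A's R sum = B's `right`
    rw [hLc, PySem.List.slice_from _ hcm0,
      PySem.List.foldl_add _ (fun col : List Char => ((col.count 'R' : Nat) : Int)) 0,
      zero_add,
      pv_zip_drop cm.toNat m.toNat _ hLcLen (by omega),
      pv_zip_sum 'R' (m.toNat - cm.toNat) _
        (by
          intro r hr
          obtain ⟨x, hx, rfl⟩ := List.mem_map.1 hr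
          rw [List.length_drop, hLcLen x hx]),
      List.map_map, List.map_map]
    simp [Function.comp_def, hT, List.map_take]

theorem pv_alt_trivial (n m : Int) (grid : List String) (h : n ≤ 0 ∨ m ≤ 0) :
    solve_alt n m grid = 0 := by
  rcases h with h | h
  · simp only [solve_alt, PySem.List.pyRange_one_eq_nil h, List.map_nil]
    rfl
  · have hfind : ((PySem.List.enumerate ((PySem.List.pyRange 0 n 1).map
        (fun i => String.ofList ((PySem.List.pyRange 0 m 1).map
          (fun j => pvCellB grid i j))))).find?
        (fun p => PySem.Str.isIn "C" p.2)) = none := by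
      simp only [PySem.List.pyRange_one_eq_nil h, List.map_nil]
      apply List.find?_eq_none.2
      intro p hp
      rw [PySem.List.mem_enumerate_iff] at hp
      obtain ⟨k, hk, rfl⟩ := hp
      simp only [List.getElem_map]
      intro hcontra
      rw [PySem.Str.isIn_iff_infix] at hcontra
      simp only [String.toList_ofList] at hcontra
      simp at hcontra
    simp only [solve_alt, hfind]

-- ===== VERDICT (by name: the statement is the Claim_ definition above) =====
theorem solve_spec : Claim_equal_solve := by
  intro n m grid _ hpre
  show solve n m grid = solve_alt n m grid
  rcases hpre with h | h | ⟨h1, h2, h3⟩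
  · rw [pv_solve_trivial n m grid (Or.inl h), pv_alt_trivial n m grid (Or.inl h)]
  · rw [pv_solve_trivial n m grid (Or.inr h), pv_alt_trivial n m grid (Or.inr h)]
  · -- the unique-'C' shape forces a nonempty region: 0 < n and 0 < m
    obtain ⟨s, hsMem, hsQ⟩ := List.countP_pos_iff.1 (by omega : 0 <
      (grid.take n.toNat).countP (fun s => decide ('C' ∈ s.toList.take m.toNat)))
    have hsC : 'C' ∈ s.toList.take m.toNat := of_decide_eq_true hsQ
    have hm : 0 < m := by
      by_contra hm
      rw [show m.toNat = 0 from by omega, List.take_zero] at hsC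
      simp at hsC
    have hn : 0 < n := by
      by_contra hn
      rw [show n.toNat = 0 from by omega, List.take_zero] at hsMem
      simp at hsMem
    exact pv_main n m grid hn hm h1 h2 h3
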